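-- pv_equiv track=rewrite | github.com/max-morris/javalineer | src/main/java/edu/lsu/cct/javalineer/parts.py | incr
-- ===== SOURCE A (Python) =====
-- read_states = ["ReadOnly", "WriteOnly"] #, "ReadWrite"]
--
-- def incr(read_list,index=0):
--     if index == len(read_list):
--         return False
--     read_list[index] += 1
--     if read_list[index] == len(read_states):
--         read_list[index] = 0
--         return incr(read_list, index+1)
--     return True
-- ===== SOURCE B (Python) =====
-- read_states = ["ReadOnly", "WriteOnly"]
--
-- def incr(read_list, index=0):
--     # Odometer step as "find first non-maximal digit": zero the run of maximal
--     # digits starting at index, then bump the first non-maximal one (if any).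
--     tail = read_list[index:]
--     limit = len(read_states) - 1
--     k = next((j for j, v in enumerate(tail) if v != limit), len(tail))
--     for j in range(k):
--         read_list[index + j] = 0
--     if index + k == len(read_list):
--         return False
--     read_list[index + k] += 1
--     return True
-- ===== Notes on version B (the rewrite author's own statement) =====
-- stated objective: simpler
-- what changed: A recurses digit by digit carrying state through recursive calls; B does a single scan for the first non-maximal digit (next over enumerate on read_list[index:]), zeroes the run before it and bumps it, deciding True/False from one arithmetic comparison.
import Mathlib
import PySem

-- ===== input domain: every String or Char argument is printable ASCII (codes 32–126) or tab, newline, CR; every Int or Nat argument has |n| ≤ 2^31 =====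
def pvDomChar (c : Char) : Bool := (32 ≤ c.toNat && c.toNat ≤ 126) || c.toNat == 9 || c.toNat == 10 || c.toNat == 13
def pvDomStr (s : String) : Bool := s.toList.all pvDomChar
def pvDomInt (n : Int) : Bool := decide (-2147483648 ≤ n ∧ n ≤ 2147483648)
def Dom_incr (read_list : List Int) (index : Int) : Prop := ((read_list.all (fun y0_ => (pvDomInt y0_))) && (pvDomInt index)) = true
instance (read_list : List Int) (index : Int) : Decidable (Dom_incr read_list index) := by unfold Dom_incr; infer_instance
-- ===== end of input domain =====

-- B replaces A's one-step-per-digit recursion by a single scan for the first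
-- non-maximal digit (objective: simpler). Both Pythons mutate read_list; the
-- equivalence proved here is about the RETURN value only (for index ≥ 0 the
-- mutations also coincide; for negative index they differ).

-- ===== PORT A =====
-- read_states = ["ReadOnly", "WriteOnly"]
def read_states : List String := ["ReadOnly", "WriteOnly"]

def incr (read_list : List Int) (index : Int) : Bool :=
  if index = read_list.length then false
  else
    match h : PySem.List.pyGet? read_list index with
    | none => false  -- IndexError in Python (excluded by Pre_incr)
    | some v =>
      -- read_list[index] += 1; if read_list[index] == len(read_states):
      if v + 1 = read_states.length then
        incr (PySem.List.pySetD read_list index 0) (index + 1)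
      else true
termination_by ((read_list.length : Int) + 1 - index).toNat
decreasing_by
  have hin : ¬ PySem.List.pyGet? read_list index = none := by simp [h]
  rw [PySem.List.pyGet?_eq_none_iff] at hin
  push Not at hin
  unfold PySem.Raise.InRange at hin
  simp [PySem.List.length_pySetD]
  omega

-- ===== PORT B =====
def incr_alt (read_list : List Int) (index : Int) : Bool :=
  let tail := PySem.List.slice read_list (some index) none  -- read_list[index:]
  let limit : Int := read_states.length - 1
  -- k = next((j for j, v in enumerate(tail) if v != limit), len(tail))
  let k : Nat := (tail.findIdx? (fun v => v != limit)).getD tail.length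
  -- (the zeroing loop and the increment mutate read_list only; no effect on the result)
  if index + (k : Int) = read_list.length then false else true

-- ===== PRECONDITION & SPEC =====
-- Pre_ excludes exactly the inputs where A raises IndexError (index out of Python range,
-- and not the sentinel index == len).
def Pre_incr (read_list : List Int) (index : Int) : Prop :=
  -(read_list.length : Int) ≤ index ∧ index ≤ read_list.length
instance (read_list : List Int) (index : Int) : Decidable (Pre_incr read_list index) := by
  unfold Pre_incr; infer_instance
def pvWitness_incr : List Int × Int := ([1, 0, 1], 0)

def Spec_incr (read_list : List Int) (index : Int) (out : Bool) : Prop := out = incr_alt read_list index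
instance (read_list : List Int) (index : Int) (out : Bool) : Decidable (Spec_incr read_list index out) := by unfold Spec_incr; infer_instance

-- ===== CLAIM (what is proved, stated in full; the proofs are below) =====
def Claim_equal_incr : Prop := ∀ (read_list : List Int) (index : Int), Dom_incr read_list index → Pre_incr read_list index → Spec_incr read_list index (incr read_list index)

-- ===== LEMMAS AND PROOFS =====

-- number of leading maximal digits (the `k` that B computes)
def kOf (xs : List Int) : Nat := (xs.findIdx? (fun v => v != (1:Int))).getD xs.length

theorem kOf_le (xs : List Int) : kOf xs ≤ xs.length := by
  unfold kOf
  cases h : xs.findIdx? (fun v => v != (1:Int)) with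
  | none => simp
  | some j =>
    rw [List.findIdx?_eq_some_iff_findIdx_eq] at h
    simp
    omega

theorem kOf_lt_of_mem (xs : List Int) (x : Int) (hx : x ∈ xs) (hne : x ≠ 1) :
    kOf xs < xs.length := by
  unfold kOf
  cases h : xs.findIdx? (fun v => v != (1:Int)) with
  | none =>
    rw [List.findIdx?_eq_none_iff] at h
    have := h x hx
    simp [hne] at this
  | some j =>
    rw [List.findIdx?_eq_some_iff_findIdx_eq] at h
    simp
    omega

theorem kOf_cons_ne (v : Int) (r : List Int) (h : v ≠ 1) : kOf (v :: r) = 0 := by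
  unfold kOf
  rw [List.findIdx?_cons]
  simp [h]

theorem kOf_cons_one (r : List Int) : kOf ((1:Int) :: r) = kOf r + 1 := by
  unfold kOf
  rw [List.findIdx?_cons]
  cases h : r.findIdx? (fun v => v != (1:Int)) with
  | none => simp
  | some j => simp


theorem pySetD_neg (xs : List Int) (k : Nat) (h0 : 0 < k) (h : k ≤ xs.length) (v : Int) :
    PySem.List.pySetD xs (-(k:Int)) v = xs.set (xs.length - k) v := by
  simp only [PySem.List.pySetD, PySem.List.pySet?, PySem.List.pyIdx?]
  rw [if_neg (by omega), if_pos (by omega)]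
  simp

theorem alt_eq (rl : List Int) (index : Int) :
    incr_alt rl index =
      !decide (index + (kOf (rl.drop (PySem.List.clampIdx rl.length index)) : Int)
                = rl.length) := by
  unfold incr_alt kOf
  rw [PySem.List.slice_some_none]
  norm_num [read_states]

theorem incr_nat (d : Nat) : ∀ (rl : List Int) (i : Nat), rl.length - i = d → i ≤ rl.length →
    incr rl (i:Int) = !decide (i + kOf (rl.drop i) = rl.length) := by
  induction d with
  | zero =>
    intro rl i hd hle
    have hi : i = rl.length := by omega
    subst hi
    rw [incr]
    simp [kOf]

  | succ d ih =>
    intro rl i hd hle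
    have hi : i < rl.length := by omega
    rw [incr]
    rw [if_neg (by exact_mod_cast (by omega : ¬ (i = rl.length)))]
    split
    · rename_i hnone
      rw [PySem.List.pyGet?_natCast, List.getElem?_eq_getElem hi] at hnone
      exact absurd hnone (by simp)
    · rename_i v hsome
      rw [PySem.List.pyGet?_natCast, List.getElem?_eq_getElem hi] at hsome
      have hv : v = rl[i] := by injection hsome with hh; exact hh.symm
      subst hv
      by_cases hv1 : rl[i] + 1 = ((read_states.length : Nat) : Int)
      · rw [if_pos hv1]
        have h1 : rl[i] = 1 := by simp [read_states] at hv1; omega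
        rw [PySem.List.pySetD_of_nonneg _ _ (by positivity)]
        have hc : ((i:Int)).toNat = i := by simp
        rw [hc]
        have hc2 : (i:Int) + 1 = ((i + 1 : Nat) : Int) := by push_cast; ring
        rw [hc2]
        rw [ih (rl.set i 0) (i+1) (by simp; omega) (by simp; omega)]
        rw [List.drop_set, if_pos (by omega)]
        rw [List.drop_eq_getElem_cons hi, h1, kOf_cons_one]
        simp only [List.length_set]
        congr 1
        rw [decide_eq_decide]
        omega
      · rw [if_neg hv1]
        have h1 : rl[i] ≠ 1 := by simp [read_states] at hv1 ⊢; omega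
        rw [List.drop_eq_getElem_cons hi, kOf_cons_ne _ _ h1]
        simp
        omega

theorem incr_neg (m : Nat) : ∀ (rl : List Int), 0 < m → m ≤ rl.length →
    incr rl (-(m:Int)) = true := by
  induction m with
  | zero => intro rl h; omega
  | succ p ih =>
    intro rl _ hle
    rw [incr]
    rw [if_neg (by push_cast; omega)]
    have hidx : rl.length - (p+1) < rl.length := by omega
    split
    · rename_i hnone
      rw [PySem.List.pyGet?_neg_natCast rl (p+1) (by omega) hle,
          List.getElem?_eq_getElem hidx] at hnone
      exact absurd hnone (by simp)
    · rename_i v hsome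
      rw [PySem.List.pyGet?_neg_natCast rl (p+1) (by omega) hle,
          List.getElem?_eq_getElem hidx] at hsome
      have hv : v = rl[rl.length - (p+1)] := by injection hsome with hh; exact hh.symm
      by_cases hv1 : v + 1 = ((read_states.length : Nat) : Int)
      · rw [if_pos hv1]
        have h1 : rl[rl.length - (p+1)] = 1 := by
          simp [read_states] at hv1; omega
        rw [pySetD_neg rl (p+1) (by omega) hle]
        have harith : -(((p+1):Nat):Int) + 1 = -((p:Nat):Int) := by push_cast; ring
        rw [harith]
        rcases Nat.eq_zero_or_pos p with hp0 | hp0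
        · subst hp0
          have h0 : -(((0:Nat)):Int) = (((0:Nat)):Int) := by simp
          rw [h0]
          rw [incr_nat ((rl.set (rl.length - (0+1)) 0).length - 0) _ 0 rfl (by omega)]
          have hmem : (0:Int) ∈ rl.set (rl.length - (0+1)) 0 := by
            have hlt : rl.length - (0+1) < (rl.set (rl.length - (0+1)) 0).length := by
              simp; omega
            have hmem0 := List.getElem_mem hlt
            rw [List.getElem_set_self (h := hlt)] at hmem0
            exact hmem0
          have hk := kOf_lt_of_mem _ 0 hmem (by norm_num)
          simp at hk ⊢
          omega
        · exact ih _ hp0 (by simp; omega)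
      · rw [if_neg hv1]

-- ===== VERDICT (by name: the statement is the Claim_ definition above) =====
theorem incr_spec : Claim_equal_incr := by
  intro rl index _ hpre
  unfold Spec_incr
  obtain ⟨hlo, hhi⟩ := hpre
  rcases (by omega : 0 ≤ index ∨ index < 0) with hpos | hneg
  · obtain ⟨i, rfl⟩ : ∃ i : Nat, index = (i:Int) := ⟨index.toNat, by omega⟩
    have hle : i ≤ rl.length := by exact_mod_cast hhi
    rw [incr_nat (rl.length - i) rl i rfl hle, alt_eq, PySem.List.clampIdx_natCast]
    rw [show min i rl.length = i from by omega]
    congr 1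
    rw [decide_eq_decide]
    omega
  · obtain ⟨m, rfl⟩ : ∃ m : Nat, index = -(m:Int) := ⟨(-index).toNat, by omega⟩
    have hm0 : 0 < m := by omega
    have hmle : m ≤ rl.length := by omega
    rw [incr_neg m rl hm0 hmle, alt_eq, PySem.List.clampIdx_neg_natCast _ _ hm0]
    have hk := kOf_le (rl.drop (rl.length - m))
    rw [List.length_drop] at hk
    have hne : ¬ (-(m:Int) + (kOf (rl.drop (rl.length - m)) : Int) = rl.length) := by
      omega
    simp [hne]
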